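-- pv_equiv track=rewrite | github.com/Moshik21/engram | server/engram/retrieval/state.py | entity_type_to_domain
-- ===== SOURCE A (Python) =====
-- def entity_type_to_domain(
--     entity_type: str,
--     domain_groups: dict[str, list[str]],
-- ) -> str:
--     """Map entity type to domain name."""
--     for domain, types in domain_groups.items():
--         if entity_type in types:
--             return domain
--     return "knowledge"
-- ===== SOURCE B (Python) =====
-- def entity_type_to_domain(
--     entity_type: str,
--     domain_groups: dict[str, list[str]],
-- ) -> str:
--     """Map entity type to domain name."""
--     index = {}
--     for domain, types in domain_groups.items():
--         for t in types:
--             if t not in index: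
--                 index[t] = domain
--     return index.get(entity_type, "knowledge")
-- ===== Notes on version B (the rewrite author's own statement) =====
-- stated objective: alternative
-- what changed: Replaces the short-circuiting membership scan over groups with building a full inverted index (type -> first domain, no overwrites) and a single dictionary lookup.
import Mathlib
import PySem

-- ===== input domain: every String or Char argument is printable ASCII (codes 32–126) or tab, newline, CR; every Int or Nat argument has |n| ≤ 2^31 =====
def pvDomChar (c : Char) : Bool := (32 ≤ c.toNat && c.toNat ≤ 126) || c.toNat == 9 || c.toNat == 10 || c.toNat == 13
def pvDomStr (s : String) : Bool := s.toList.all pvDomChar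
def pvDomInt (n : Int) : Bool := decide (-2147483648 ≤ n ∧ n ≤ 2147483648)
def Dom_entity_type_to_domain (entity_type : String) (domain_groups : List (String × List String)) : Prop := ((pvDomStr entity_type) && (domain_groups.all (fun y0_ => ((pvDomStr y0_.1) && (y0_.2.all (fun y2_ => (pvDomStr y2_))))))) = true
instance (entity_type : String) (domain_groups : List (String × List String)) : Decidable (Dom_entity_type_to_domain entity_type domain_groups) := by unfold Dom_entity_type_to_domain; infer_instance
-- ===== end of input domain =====

-- B builds an inverted index (entity type -> first domain, no overwrites) and answers with one lookup,
-- instead of A's short-circuiting scan over the groups; alternative decomposition, same cost.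


-- ===== PORT A =====
-- literal port: scan the groups in order, return the first domain whose type list contains entity_type
def entity_type_to_domain (entity_type : String) (domain_groups : List (String × List String)) : String :=
  match domain_groups with
  | [] => "knowledge"
  | (domain, types) :: rest =>
    if types.contains entity_type then domain
    else entity_type_to_domain entity_type rest

-- ===== PORT B =====
-- first-match lookup in an association list (Python dict get)
def pvIdxGet (idx : List (String × String)) (k : String) : Option String :=
  match idx with
  | [] => none
  | (k', v) :: rest => if k' = k then some v else pvIdxGet rest k

-- inner loop of B: record each type under `domain` only if not already present
def pvAddTypes (idx : List (String × String)) (domain : String) (types : List String) : List (String × String) :=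
  match types with
  | [] => idx
  | t :: ts =>
    pvAddTypes (if (pvIdxGet idx t).isSome then idx else idx ++ [(t, domain)]) domain ts

-- outer loop of B: fold all groups into the inverted index
def pvBuildIndex (idx : List (String × String)) (groups : List (String × List String)) : List (String × String) :=
  match groups with
  | [] => idx
  | (domain, types) :: rest => pvBuildIndex (pvAddTypes idx domain types) rest

def entity_type_to_domain_alt (entity_type : String) (domain_groups : List (String × List String)) : String :=
  (pvIdxGet (pvBuildIndex [] domain_groups) entity_type).getD "knowledge"

-- ===== PRECONDITION & SPEC =====
def Spec_entity_type_to_domain (entity_type : String) (domain_groups : List (String × List String)) (out : String) : Prop := out = entity_type_to_domain_alt entity_type domain_groups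
instance (entity_type : String) (domain_groups : List (String × List String)) (out : String) : Decidable (Spec_entity_type_to_domain entity_type domain_groups out) := by unfold Spec_entity_type_to_domain; infer_instance

-- ===== CLAIM (what is proved, stated in full; the proofs are below) =====
def Claim_equal_entity_type_to_domain : Prop := ∀ (entity_type : String) (domain_groups : List (String × List String)), Dom_entity_type_to_domain entity_type domain_groups → Spec_entity_type_to_domain entity_type domain_groups (entity_type_to_domain entity_type domain_groups)

-- ===== LEMMAS AND PROOFS =====

theorem pvIdxGet_append (idx : List (String × String)) (p : String × String) (k : String) :
    pvIdxGet (idx ++ [p]) k = ((pvIdxGet idx k).orElse (fun _ => if p.1 = k then some p.2 else none)) := by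
  induction idx with
  | nil => simp [pvIdxGet, Option.orElse]
  | cons h t ih =>
    obtain ⟨k', v⟩ := h
    by_cases hk : k' = k <;> simp [pvIdxGet, hk, ih, Option.orElse]

theorem pvIdxGet_addTypes (idx : List (String × String)) (d : String) (ts : List String) (k : String) :
    pvIdxGet (pvAddTypes idx d ts) k =
      ((pvIdxGet idx k).orElse (fun _ => if ts.contains k then some d else none)) := by
  induction ts generalizing idx with
  | nil => simp [pvAddTypes, Option.orElse]; cases pvIdxGet idx k <;> rfl
  | cons t ts ih =>
    simp only [pvAddTypes, ih, List.contains_cons]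
    by_cases hs : (pvIdxGet idx t).isSome
    · simp only [hs, if_pos]
      cases hg : pvIdxGet idx k with
      | some v => simp [Option.orElse]
      | none =>
        simp only [Option.orElse]
        by_cases hk : k = t
        · subst hk; rw [hg] at hs; simp at hs
        · have : (k == t) = false := by simp [hk]
          simp [this]
    · simp only [hs, if_neg, Bool.not_eq_true]
      rw [pvIdxGet_append]
      cases hg : pvIdxGet idx k with
      | some v => simp [Option.orElse]
      | none =>
        simp only [Option.orElse]
        by_cases hk : k = t
        · subst hk; simp
        · have h1 : (k == t) = false := by simp [hk]
          have h2 : ¬ (t = k) := fun h => hk h.symm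
          simp [h1, h2]

-- characterisation of A as an optional scan
def pvScan (k : String) (groups : List (String × List String)) : Option String :=
  match groups with
  | [] => none
  | (d, ts) :: rest => if ts.contains k then some d else pvScan k rest

theorem pvIdxGet_buildIndex (idx : List (String × String)) (groups : List (String × List String)) (k : String) :
    pvIdxGet (pvBuildIndex idx groups) k =
      ((pvIdxGet idx k).orElse (fun _ => pvScan k groups)) := by
  induction groups generalizing idx with
  | nil => cases h : pvIdxGet idx k <;> simp [pvBuildIndex, pvScan, Option.orElse, h]
  | cons g rest ih =>
    obtain ⟨d, ts⟩ := g
    simp only [pvBuildIndex, ih, pvIdxGet_addTypes, pvScan]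
    cases pvIdxGet idx k <;> cases hc : ts.contains k <;> simp_all [Option.orElse]

theorem entity_eq_scan (k : String) (groups : List (String × List String)) :
    entity_type_to_domain k groups = (pvScan k groups).getD "knowledge" := by
  induction groups with
  | nil => rfl
  | cons g rest ih =>
    obtain ⟨d, ts⟩ := g
    by_cases hc : k ∈ ts <;> simp [entity_type_to_domain, pvScan, hc, ih]

-- ===== VERDICT (by name: the statement is the Claim_ definition above) =====
theorem entity_type_to_domain_spec : Claim_equal_entity_type_to_domain := by
  intro et gs _
  unfold Spec_entity_type_to_domain entity_type_to_domain_alt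
  rw [pvIdxGet_buildIndex, entity_eq_scan]
  simp [pvIdxGet, Option.orElse]
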